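-- pv_equiv track=rewrite | github.com/kWsNightman/dfdj12 | auth_perms/core/utils.py | is_valid_public_key
-- ===== SOURCE A (Python) =====
-- import string
--
-- def is_valid_public_key(public_key: str):
--     """
--     Check if public key is valid by length and prefix
--     :param public_key: string public key
--     :return: True if valid else False
--     """
--     # Public key length if we using coordinates (04 prefix) is 130
--     # symbols.
--     if len(public_key) != 130:
--         return False
--
--     # Check whether public key contains hex characters only
--     if not all(c in string.hexdigits for c in public_key):
--         return False
--
--     # We should check on 04 prefix cause ecdsa public key with
--     # Elliptic Curve starts with prefix 04
--     if not public_key.startswith('04'):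
--         return False
--     return True
-- ===== SOURCE B (Python) =====
-- # B: one anchored regular expression instead of three sequential checks.
-- import re
--
-- _PK_RE = re.compile(r'04[0-9a-fA-F]{128}')
--
--
-- def is_valid_public_key(public_key: str):
--     return bool(_PK_RE.fullmatch(public_key))
-- ===== Notes on version B (the rewrite author's own statement) =====
-- stated objective: idiomatic
-- what changed: Replaced the three sequential checks (length 130, all-hexdigit scan, 04 prefix) by a single precompiled anchored regular-expression fullmatch: a literal 04 prefix followed by exactly 128 hex-class characters.
import Mathlib
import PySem

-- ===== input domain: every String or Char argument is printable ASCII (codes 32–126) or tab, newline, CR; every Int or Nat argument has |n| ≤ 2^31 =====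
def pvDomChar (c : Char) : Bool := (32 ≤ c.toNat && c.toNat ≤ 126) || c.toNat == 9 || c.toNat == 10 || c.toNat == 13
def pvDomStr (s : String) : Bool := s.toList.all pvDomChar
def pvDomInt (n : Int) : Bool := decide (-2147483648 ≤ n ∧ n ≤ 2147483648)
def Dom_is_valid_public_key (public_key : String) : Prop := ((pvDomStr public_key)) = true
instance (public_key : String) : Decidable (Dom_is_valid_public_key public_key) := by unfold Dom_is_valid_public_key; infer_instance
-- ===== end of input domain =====

-- B replaces A's three sequential checks by one anchored regex fullmatch; proved equal on all strings.

-- ===== PORT A =====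
-- string.hexdigits, as a list of its characters
def pvHexdigits : List Char := ['0','1','2','3','4','5','6','7','8','9','a','b','c','d','e','f','A','B','C','D','E','F']

def is_valid_public_key (public_key : String) : Bool :=
  if PySem.Str.len public_key ≠ 130 then false
  -- 'c in string.hexdigits': Python substring test of the 1-char string c, exact via Chars.isIn [c]
  else if !(public_key.toList.all (fun c => PySem.Chars.isIn [c] pvHexdigits)) then false
  else if !(PySem.Str.startswith public_key "04") then false
  else true

-- ===== PORT B =====
-- the character class [0-9a-fA-F] of the regex
def pvHexChar (c : Char) : Bool :=
  (48 ≤ c.toNat && c.toNat ≤ 57) || (97 ≤ c.toNat && c.toNat ≤ 102) || (65 ≤ c.toNat && c.toNat ≤ 70)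

-- re.fullmatch(r'04[0-9a-fA-F]{128}', s): literal '0','4', then exactly 128 chars of the class, end of string
def is_valid_public_key_alt (public_key : String) : Bool :=
  match public_key.toList with
  | c1 :: c2 :: rest => c1 == '0' && c2 == '4' && rest.length == 128 && rest.all pvHexChar
  | _ => false

-- ===== PRECONDITION & SPEC =====
def Spec_is_valid_public_key (public_key : String) (out : Bool) : Prop := out = is_valid_public_key_alt public_key
instance (public_key : String) (out : Bool) : Decidable (Spec_is_valid_public_key public_key out) := by unfold Spec_is_valid_public_key; infer_instance

-- ===== CLAIM (what is proved, stated in full; the proofs are below) =====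
def Claim_equal_is_valid_public_key : Prop := ∀ (public_key : String), Dom_is_valid_public_key public_key → Spec_is_valid_public_key public_key (is_valid_public_key public_key)

-- ===== LEMMAS AND PROOFS =====

-- membership in string.hexdigits coincides with the regex character class
theorem pv_hex_mem (c : Char) : (c ∈ pvHexdigits) ↔ pvHexChar c = true := by
  have h : ∀ d : Char, c = d ↔ c.toNat = d.toNat := by
    intro d
    constructor
    · intro h; rw [h]
    · intro h; exact Char.ext (UInt32.toNat_inj.mp h)
  simp only [pvHexdigits, pvHexChar, List.mem_cons, List.not_mem_nil, or_false, h,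
    Bool.or_eq_true, Bool.and_eq_true, decide_eq_true_iff, (show ('0').toNat = 48 from rfl), (show ('1').toNat = 49 from rfl), (show ('2').toNat = 50 from rfl), (show ('3').toNat = 51 from rfl), (show ('4').toNat = 52 from rfl), (show ('5').toNat = 53 from rfl), (show ('6').toNat = 54 from rfl), (show ('7').toNat = 55 from rfl), (show ('8').toNat = 56 from rfl), (show ('9').toNat = 57 from rfl), (show ('a').toNat = 97 from rfl), (show ('b').toNat = 98 from rfl), (show ('c').toNat = 99 from rfl), (show ('d').toNat = 100 from rfl), (show ('e').toNat = 101 from rfl), (show ('f').toNat = 102 from rfl), (show ('A').toNat = 65 from rfl), (show ('B').toNat = 66 from rfl), (show ('C').toNat = 67 from rfl), (show ('D').toNat = 68 from rfl), (show ('E').toNat = 69 from rfl), (show ('F').toNat = 70 from rfl)]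
  omega

-- A's per-character substring test equals B's class test
theorem pv_isIn_hex (c : Char) : PySem.Chars.isIn [c] pvHexdigits = pvHexChar c := by
  rw [Bool.eq_iff_iff, PySem.Chars.isIn_iff_infix]
  rw [← pv_hex_mem c]
  constructor
  · intro hinf
    rcases hinf with ⟨p, q, hpq⟩
    have : c ∈ p ++ [c] ++ q := by simp
    rw [hpq] at this; exact this
  · intro hm
    rcases List.append_of_mem hm with ⟨p, q, hpq⟩
    exact ⟨p, q, by rw [hpq]; simp⟩

theorem pv_main (s : String) : is_valid_public_key s = is_valid_public_key_alt s := by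
  unfold is_valid_public_key is_valid_public_key_alt
  simp only [pv_isIn_hex, PySem.Str.len_eq, PySem.Str.startswith_eq]
  have h04 : "04".toList = ['0', '4'] := rfl
  simp only [h04]
  cases htl : s.toList with
  | nil => simp
  | cons c1 t =>
    cases t with
    | nil => simp
    | cons c2 rest =>
      by_cases hL : rest.length = 128
      · have hlen : ¬(((c1 :: c2 :: rest).length : Int) ≠ 130) := by
          simp only [List.length_cons, hL]
          omega
        rw [if_neg hlen]
        by_cases hc : c1 = '0' ∧ c2 = '4'
        · obtain ⟨h1, h2⟩ := hc; subst h1; subst h2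
          have hsw : PySem.Chars.startswith ('0' :: '4' :: rest) ['0', '4'] = true := by
            rw [PySem.Chars.startswith_iff]
            simp [List.cons_prefix_cons]
          have p0 : pvHexChar '0' = true := by decide
          have p4 : pvHexChar '4' = true := by decide
          simp only [List.all_cons, p0, p4, Bool.true_and, hsw, Bool.not_true, hL]
          cases hall : rest.all pvHexChar <;> simp_all
        · have hb : (c1 == '0' && c2 == '4') = false := by
            rw [Bool.eq_false_iff]
            intro h
            simp only [Bool.and_eq_true, beq_iff_eq] at h
            exact hc h
          have hsw : PySem.Chars.startswith (c1 :: c2 :: rest) ['0', '4'] = false := by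
            rw [Bool.eq_false_iff]
            intro h
            rw [PySem.Chars.startswith_iff, List.cons_prefix_cons] at h
            obtain ⟨h1, h⟩ := h
            rw [List.cons_prefix_cons] at h
            exact hc ⟨h1.symm, h.1.symm⟩
          simp [hsw, hb]
      · have h1 : ((c1 :: c2 :: rest).length : Int) ≠ 130 := by
          simp only [List.length_cons]
          omega
        rw [if_pos h1]
        have h2 : (rest.length == 128) = false := by simp [hL]
        simp [h2]

-- ===== VERDICT (by name: the statement is the Claim_ definition above) =====
theorem is_valid_public_key_spec : Claim_equal_is_valid_public_key := by
  intro s _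
  unfold Spec_is_valid_public_key
  exact pv_main s
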